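-- pv_equiv track=rewrite | github.com/dask/dask | dask/array/_array_expr/_broadcast.py | _slice_chunks
-- ===== SOURCE A (Python) =====
-- def _slice_chunks(chunks, start, length):
--     """Compute new chunks after slicing."""
--     if length == 0:
--         return ()
--
--     result = []
--     pos = 0
--     remaining = length
--     for chunk_size in chunks:
--         chunk_start = pos
--         chunk_end = pos + chunk_size
--         pos = chunk_end
--
--         if chunk_end <= start:
--             continue
--         if chunk_start >= start + length:
--             break
--
--         # Overlap with the slice
--         overlap_start = max(chunk_start, start)
--         overlap_end = min(chunk_end, start + length)
--         overlap_size = overlap_end - overlap_start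
--
--         if overlap_size > 0:
--             result.append(overlap_size)
--             remaining -= overlap_size
--
--     return tuple(result)
-- ===== SOURCE B (Python) =====
-- from itertools import accumulate
--
--
-- def _slice_chunks(chunks, start, length):
--     """Compute new chunks after slicing."""
--     if length == 0:
--         return ()
--     total = sum(chunks)
--     bounds = list(accumulate(chunks, initial=0))
--     lo = max(start, 0)
--     hi = min(start + length, total)
--     cuts = [lo] + [b for b in bounds if lo < b < hi] + [hi]
--     return tuple(d for d in (b - a for a, b in zip(cuts, cuts[1:])) if d > 0)
-- ===== Notes on version B (the rewrite author's own statement) =====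
-- stated objective: alternative
-- what changed: Instead of scanning chunks with a running position and clipping each chunk's overlap (continue/break), B builds the cut-point list of the sliced axis -- the clamped window ends plus every prefix-sum boundary strictly inside the window -- and returns the positive differences of consecutive cuts.
-- outside the precondition, e.g. on _slice_chunks((2, -1, 2), 1, 2): A returns (1, 2), B returns (1, 1)
import Mathlib
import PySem

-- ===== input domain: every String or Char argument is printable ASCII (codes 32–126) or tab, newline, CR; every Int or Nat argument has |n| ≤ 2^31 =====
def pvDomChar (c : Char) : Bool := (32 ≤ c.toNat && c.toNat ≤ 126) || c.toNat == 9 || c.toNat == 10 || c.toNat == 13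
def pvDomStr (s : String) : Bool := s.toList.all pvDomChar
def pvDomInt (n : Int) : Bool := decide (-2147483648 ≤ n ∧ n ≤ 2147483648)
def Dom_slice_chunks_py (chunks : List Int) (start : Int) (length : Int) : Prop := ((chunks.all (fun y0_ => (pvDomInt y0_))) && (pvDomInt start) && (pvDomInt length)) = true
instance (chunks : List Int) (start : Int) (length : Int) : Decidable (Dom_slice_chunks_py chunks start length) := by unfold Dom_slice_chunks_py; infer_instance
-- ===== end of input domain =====

-- B replaces A's running-position scan with clipping (continue/break) by building the cut-point
-- list of the sliced axis (clamped window ends plus the prefix-sum boundaries strictly inside the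
-- window) and taking positive differences of consecutive cuts; alternative decomposition, same O(n).

-- ===== PORT A =====
-- A's loop: state (result, pos, remaining); 'continue' = tail call, 'break' = return of the list so far
def sliceA_loop (start length : Int) : List Int → Int → Int → List Int
  | [], _, _ => []
  | c :: cs, pos, remaining =>
    let chunk_start := pos
    let chunk_end := pos + c
    if chunk_end ≤ start then sliceA_loop start length cs chunk_end remaining
    else if chunk_start ≥ start + length then []
    else
      let overlap_size := min chunk_end (start + length) - max chunk_start start
      if overlap_size > 0 then
        overlap_size :: sliceA_loop start length cs chunk_end (remaining - overlap_size)
      else sliceA_loop start length cs chunk_end remaining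

def slice_chunks_py (chunks : List Int) (start : Int) (length : Int) : List Int :=
  if length = 0 then [] else sliceA_loop start length chunks 0 length

-- ===== PORT B =====
-- sum(chunks) → List.sum; itertools.accumulate(chunks, initial=0) → List.scanl; the zip/diff
-- comprehension is mapped over cuts.zip cuts.tail exactly as Source B writes it
def slice_chunks_py_alt (chunks : List Int) (start : Int) (length : Int) : List Int :=
  if length = 0 then [] else
    let total := chunks.sum
    let bounds := List.scanl (· + ·) 0 chunks
    let lo := max start 0
    let hi := min (start + length) total
    let cuts := lo :: bounds.filter (fun b => lo < b && b < hi) ++ [hi]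
    ((cuts.zip cuts.tail).map (fun p => p.2 - p.1)).filter (fun d => 0 < d)

-- ===== PRECONDITION & SPEC =====
-- Pre_ excludes negative chunk sizes: a negative size is outside the natural domain of a chunk
-- tuple (dask chunk sizes are nonnegative); A still returns a value there, but its prefix sums are
-- non-monotone and A's running-position clipping and B's cut-point differences legitimately disagree.
def Pre_slice_chunks_py (chunks : List Int) (start : Int) (length : Int) : Prop :=
  ∀ c ∈ chunks, 0 ≤ c
instance (chunks : List Int) (start : Int) (length : Int) : Decidable (Pre_slice_chunks_py chunks start length) := by unfold Pre_slice_chunks_py; infer_instance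

def pvWitness_slice_chunks_py : List Int × Int × Int := ([2, 3, 1], 2, 3)

def Spec_slice_chunks_py (chunks : List Int) (start : Int) (length : Int) (out : List Int) : Prop := out = slice_chunks_py_alt chunks start length
instance (chunks : List Int) (start : Int) (length : Int) (out : List Int) : Decidable (Spec_slice_chunks_py chunks start length out) := by unfold Spec_slice_chunks_py; infer_instance

-- ===== CLAIM (what is proved, stated in full; the proofs are below) =====
def Claim_equal_slice_chunks_py : Prop := ∀ (chunks : List Int) (start : Int) (length : Int), Dom_slice_chunks_py chunks start length → Pre_slice_chunks_py chunks start length → Spec_slice_chunks_py chunks start length (slice_chunks_py chunks start length)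

-- ===== LEMMAS AND PROOFS =====

-- A's per-chunk clipped overlaps, filtered positive (proof-side characterisation of A's loop)
def clipsum (lo hi pos : Int) (cs : List Int) : List Int :=
  (((List.scanl (· + ·) pos cs).zip (List.scanl (· + ·) pos cs).tail).map
    (fun p => min p.2 hi - max p.1 lo)).filter (fun d => 0 < d)

-- differences of consecutive cut points (proof-side name for B's zip/map)
def dif (xs : List Int) : List Int := (xs.zip xs.tail).map (fun p => p.2 - p.1)

theorem pairs_cons (pos c : Int) (cs : List Int) :
    ((List.scanl (· + ·) pos (c :: cs)).zip (List.scanl (· + ·) pos (c :: cs)).tail)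
      = (pos, pos + c) :: ((List.scanl (· + ·) (pos + c) cs).zip (List.scanl (· + ·) (pos + c) cs).tail) := by
  cases cs <;> simp [List.scanl]

theorem clipsum_cons (lo hi pos c : Int) (cs : List Int) :
    clipsum lo hi pos (c :: cs)
      = (if 0 < min (pos + c) hi - max pos lo then [min (pos + c) hi - max pos lo] else [])
          ++ clipsum lo hi (pos + c) cs := by
  unfold clipsum
  rw [pairs_cons]
  simp only [List.map_cons, List.filter_cons, decide_eq_true_eq]
  split_ifs with h <;> simp

theorem dif_cons₂ (a b : Int) (t : List Int) :
    dif (a :: b :: t) = (b - a) :: dif (b :: t) := by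
  cases t <;> simp [dif]

theorem mem_scanl_ge (cs : List Int) (pos : Int) (hnn : ∀ c ∈ cs, 0 ≤ c) :
    ∀ b ∈ List.scanl (· + ·) pos cs, pos ≤ b := by
  induction cs generalizing pos with
  | nil => simp [List.scanl]
  | cons c cs ih =>
    intro b hb
    rw [List.scanl_cons, List.mem_cons] at hb
    rcases hb with rfl | hb
    · exact le_refl _
    · have hc : 0 ≤ c := hnn c (by simp)
      have := ih (pos + c) (fun x hx => hnn x (by simp [hx])) b hb
      omega

theorem zip_scanl_bounds (cs : List Int) (pos : Int) (hnn : ∀ c ∈ cs, 0 ≤ c) :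
    ∀ p ∈ (List.scanl (· + ·) pos cs).zip (List.scanl (· + ·) pos cs).tail,
      pos ≤ p.1 ∧ p.1 ≤ p.2 ∧ p.2 ≤ pos + cs.sum := by
  induction cs generalizing pos with
  | nil => simp [List.scanl]
  | cons c cs ih =>
    intro p hp
    rw [pairs_cons] at hp
    have hc : 0 ≤ c := hnn c (by simp)
    have hs : 0 ≤ cs.sum := List.sum_nonneg (fun x hx => hnn x (by simp [hx]))
    rcases List.mem_cons.mp hp with rfl | hp
    · simp only [List.sum_cons]; omega
    · have := ih (pos + c) (fun x hx => hnn x (by simp [hx])) p hp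
      simp only [List.sum_cons]; omega

theorem clipsum_nil_of_le (lo hi pos : Int) (cs : List Int)
    (hnn : ∀ c ∈ cs, 0 ≤ c) (h : hi ≤ pos) : clipsum lo hi pos cs = [] := by
  induction cs generalizing pos with
  | nil => simp [clipsum, List.scanl]
  | cons c cs ih =>
    have hc : 0 ≤ c := hnn c (by simp)
    rw [clipsum_cons]
    have h0 : ¬ 0 < min (pos + c) hi - max pos lo := by omega
    rw [if_neg h0, List.nil_append]
    exact ih (pos + c) (fun x hx => hnn x (by simp [hx])) (by omega)

theorem filter_scanl_nil (lo hi pos : Int) (cs : List Int)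
    (hnn : ∀ c ∈ cs, 0 ≤ c) (h : hi ≤ pos) :
    (List.scanl (· + ·) pos cs).filter (fun b => lo < b && b < hi) = [] := by
  rw [List.filter_eq_nil_iff]
  intro b hb
  have := mem_scanl_ge cs pos hnn b hb
  simp only [Bool.and_eq_true, decide_eq_true_eq, not_and]
  omega

theorem loopA (start length : Int) (cs : List Int) (pos r : Int)
    (hnn : ∀ c ∈ cs, 0 ≤ c) :
    sliceA_loop start length cs pos r = clipsum start (start + length) pos cs := by
  induction cs generalizing pos r with
  | nil => simp [sliceA_loop, clipsum, List.scanl]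
  | cons c cs ih =>
    have hc : 0 ≤ c := hnn c (by simp)
    have hnn' : ∀ x ∈ cs, 0 ≤ x := fun x hx => hnn x (by simp [hx])
    rw [clipsum_cons]
    by_cases h1 : pos + c ≤ start
    · have h0 : ¬ 0 < min (pos + c) (start + length) - max pos start := by omega
      simp only [sliceA_loop, if_pos h1, if_neg h0, List.nil_append]
      exact ih _ _ hnn'
    · by_cases h2 : pos ≥ start + length
      · have h0 : ¬ 0 < min (pos + c) (start + length) - max pos start := by omega
        simp only [sliceA_loop, if_neg h1, if_pos h2, if_neg h0, List.nil_append]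
        exact (clipsum_nil_of_le _ _ _ _ hnn' (by omega)).symm
      · simp only [sliceA_loop, if_neg h1, if_neg h2, gt_iff_lt]
        split_ifs with h0 <;> simp [ih _ _ hnn']

theorem clipsum_congr (lo₁ hi₁ lo₂ hi₂ pos : Int) (cs : List Int)
    (h : ∀ p ∈ (List.scanl (· + ·) pos cs).zip (List.scanl (· + ·) pos cs).tail,
      min p.2 hi₁ - max p.1 lo₁ = min p.2 hi₂ - max p.1 lo₂) :
    clipsum lo₁ hi₁ pos cs = clipsum lo₂ hi₂ pos cs := by
  unfold clipsum
  rw [List.map_congr_left h]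

-- duplicate leading cut produces a 0 difference, which the positivity filter removes
theorem dif_dup_head (a : Int) (xs : List Int) :
    (dif (a :: a :: xs)).filter (fun d => 0 < d) = (dif (a :: xs)).filter (fun d => 0 < d) := by
  rw [dif_cons₂]
  simp

-- widening the lower cut bound from h0 to lo ≤ h0 only adds duplicate h0-cuts, which cancel
theorem filter_lo_congr (hi lo h0 pos : Int) (cs : List Int)
    (hnn : ∀ c ∈ cs, 0 ≤ c) (hlo : lo ≤ h0) (hgt : h0 < pos) :
    (List.scanl (· + ·) pos cs).filter (fun b => lo < b && b < hi)
      = (List.scanl (· + ·) pos cs).filter (fun b => h0 < b && b < hi) := by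
  apply List.filter_congr
  intro b hb
  have hge := mem_scanl_ge cs pos hnn b hb
  have h1 : decide (lo < b) = true := by simp; omega
  have h2 : decide (h0 < b) = true := by simp; omega
  rw [h1, h2]

theorem dif_filter_lo (hi lo h0 : Int) (cs : List Int) (pos : Int)
    (hnn : ∀ c ∈ cs, 0 ≤ c) (hlo : lo ≤ h0) (hpos : h0 ≤ pos) :
    (dif (h0 :: (List.scanl (· + ·) pos cs).filter (fun b => lo < b && b < hi) ++ [hi])).filter (fun d => 0 < d)
      = (dif (h0 :: (List.scanl (· + ·) pos cs).filter (fun b => h0 < b && b < hi) ++ [hi])).filter (fun d => 0 < d) := by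
  induction cs generalizing pos with
  | nil =>
    by_cases hgt : h0 < pos
    · rw [filter_lo_congr hi lo h0 pos [] (by simp) hlo hgt]
    · have heq : pos = h0 := by omega
      subst heq
      rw [List.scanl_nil]
      by_cases hk : lo < pos ∧ pos < hi
      · rw [List.filter_cons_of_pos (p := fun b => decide (lo < b) && decide (b < hi)) (by simp; omega),
            List.filter_cons_of_neg (p := fun b => decide (pos < b) && decide (b < hi)) (by simp),
            List.filter_nil]
        simp only [List.cons_append, List.nil_append]
        rw [dif_dup_head]
        simp
      · rw [List.filter_cons_of_neg (p := fun b => decide (lo < b) && decide (b < hi)) (by simp; omega),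
            List.filter_cons_of_neg (p := fun b => decide (pos < b) && decide (b < hi)) (by simp)]
        simp
  | cons c cs ih =>
    have hc : 0 ≤ c := hnn c (by simp)
    have hnn' : ∀ x ∈ cs, 0 ≤ x := fun x hx => hnn x (by simp [hx])
    by_cases hgt : h0 < pos
    · rw [filter_lo_congr hi lo h0 pos (c :: cs) hnn hlo hgt]
    · have heq : pos = h0 := by omega
      subst heq
      rw [List.scanl_cons]
      by_cases hk : lo < pos ∧ pos < hi
      · rw [List.filter_cons_of_pos (p := fun b => decide (lo < b) && decide (b < hi)) (by simp; omega),
            List.filter_cons_of_neg (p := fun b => decide (pos < b) && decide (b < hi)) (by simp)]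
        have ih' := ih (pos + c) hnn' (by omega)
        simp only [List.cons_append] at ih' ⊢
        rw [dif_dup_head]
        exact ih'
      · rw [List.filter_cons_of_neg (p := fun b => decide (lo < b) && decide (b < hi)) (by simp; omega),
            List.filter_cons_of_neg (p := fun b => decide (pos < b) && decide (b < hi)) (by simp)]
        exact ih (pos + c) hnn' (by omega)

-- main bridge: clipped overlaps = positive differences of the cut list
theorem mainL (hi : Int) (cs : List Int) (pos lo : Int)
    (hnn : ∀ c ∈ cs, 0 ≤ c) (hplo : pos ≤ lo) (hhi : hi ≤ pos + cs.sum) :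
    clipsum lo hi pos cs
      = (dif (lo :: (List.scanl (· + ·) pos cs).filter (fun b => lo < b && b < hi) ++ [hi])).filter
          (fun d => 0 < d) := by
  induction cs generalizing pos lo with
  | nil =>
    simp only [List.sum_nil, add_zero] at hhi
    rw [List.scanl_nil,
        List.filter_cons_of_neg (p := fun b => decide (lo < b) && decide (b < hi)) (by simp; omega),
        List.filter_nil]
    simp [clipsum, dif]
    omega
  | cons c cs ih =>
    have hc : 0 ≤ c := hnn c (by simp)
    have hnn' : ∀ x ∈ cs, 0 ≤ x := fun x hx => hnn x (by simp [hx])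
    have hsum : hi ≤ pos + c + cs.sum := by simp only [List.sum_cons] at hhi; omega
    rw [clipsum_cons, List.scanl_cons,
        List.filter_cons_of_neg (p := fun b => decide (lo < b) && decide (b < hi)) (by simp; omega)]
    by_cases h1 : pos + c ≤ lo
    · have h0 : ¬ 0 < min (pos + c) hi - max pos lo := by omega
      rw [if_neg h0, List.nil_append]
      exact ih (pos + c) lo hnn' (by omega) hsum
    · by_cases h2 : hi ≤ pos + c
      · have h0v : min (pos + c) hi - max pos lo = hi - lo := by omega
        rw [h0v, clipsum_nil_of_le lo hi (pos + c) cs hnn' (by omega),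
            filter_scanl_nil lo hi (pos + c) cs hnn' (by omega), List.append_nil]
        have hd : dif (lo :: [] ++ [hi]) = [hi - lo] := by simp [dif]
        rw [hd]
        by_cases hx : (0:Int) < hi - lo
        · rw [if_pos hx,
              List.filter_cons_of_pos (p := fun d => decide (0 < d)) (by simpa using hx),
              List.filter_nil]
        · rw [if_neg hx,
              List.filter_cons_of_neg (p := fun d => decide (0 < d)) (by simpa using hx),
              List.filter_nil]
      · -- lo < pos + c < hi : the chunk end is a new interior cut
        have h0v : min (pos + c) hi - max pos lo = pos + c - lo := by omega
        obtain ⟨t, ht⟩ : ∃ t, List.scanl (· + ·) (pos + c) cs = (pos + c) :: t := by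
          cases cs with
          | nil => exact ⟨[], List.scanl_nil⟩
          | cons a l => exact ⟨_, List.scanl_cons⟩
        rw [h0v, if_pos (by omega : (0:Int) < pos + c - lo), List.singleton_append, ht,
            List.filter_cons_of_pos (p := fun b => decide (lo < b) && decide (b < hi)) (by simp; omega)]
        simp only [List.cons_append]
        rw [dif_cons₂,
            List.filter_cons_of_pos (p := fun d => decide (0 < d)) (by simp; omega)]
        have hcong : clipsum lo hi (pos + c) cs = clipsum (pos + c) hi (pos + c) cs := by
          apply clipsum_congr
          intro p hp
          have := zip_scanl_bounds cs (pos + c) hnn' p hp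
          omega
        have ih' := ih (pos + c) (pos + c) hnn' (le_refl _) hsum
        have hdl := dif_filter_lo hi lo (pos + c) cs (pos + c) hnn' (by omega) (le_refl _)
        rw [ht] at ih' hdl
        rw [List.filter_cons_of_neg (p := fun b => decide (pos + c < b) && decide (b < hi)) (by simp)] at ih'
        rw [List.filter_cons_of_pos (p := fun b => decide (lo < b) && decide (b < hi)) (by simp; omega),
            List.filter_cons_of_neg (p := fun b => decide (pos + c < b) && decide (b < hi)) (by simp)] at hdl
        simp only [List.cons_append] at ih' hdl
        rw [dif_dup_head] at hdl
        rw [hcong, ih', ← hdl]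

-- ===== VERDICT (by name: the statement is the Claim_ definition above) =====
theorem slice_chunks_py_spec : Claim_equal_slice_chunks_py := by
  intro chunks start length _ hpre
  unfold Spec_slice_chunks_py slice_chunks_py slice_chunks_py_alt
  by_cases h : length = 0
  · simp [h]
  · simp only [if_neg h]
    have hsum : 0 ≤ chunks.sum := List.sum_nonneg hpre
    rw [loopA start length chunks 0 length hpre]
    have hcong : clipsum start (start + length) 0 chunks
        = clipsum (max start 0) (min (start + length) chunks.sum) 0 chunks := by
      apply clipsum_congr
      intro p hp
      have := zip_scanl_bounds chunks 0 hpre p hp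
      omega
    rw [hcong,
        mainL (min (start + length) chunks.sum) chunks 0 (max start 0) hpre (by omega) (by omega)]
    rfl
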